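-- pv_equiv track=rewrite | github.com/robertoash/.dotfiles | common/config/fish/functions/_word_boundary.py | delete_backward
-- ===== SOURCE A (Python) =====
-- DELIMITERS = set(" /\"'`()[]{}") | {"-"}
--
-- def is_delim(ch):
--     return ch in DELIMITERS
--
-- def delete_backward(before, after=""):
--     """Delete backward from end of `before`. Returns (keep, full_new_line)."""
--     if not before:
--         return "", after
--
--     # Phase A: last char is a non-delimiter → delete word back to nearest delimiter
--     if not is_delim(before[-1]):
--         i = len(before) - 1
--         while i > 0 and not is_delim(before[i - 1]):
--             i -= 1
--         keep = before[:i]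
--         return keep, keep + after
--
--     # Phase B: last char IS a delimiter
--     # Step 1: delete run of same trailing delimiter char
--     trail_char = before[-1]
--     i = len(before) - 1
--     while i > 0 and before[i - 1] == trail_char:
--         i -= 1
--     stripped = before[:i]
--
--     # Step 2: if nothing left, we're done
--     if not stripped:
--         return "", after
--
--     # Step 3: if stripped ends with a space, just delete the delimiter run (space is a separator)
--     if trail_char == " ":
--         return stripped, stripped + after
--
--     # Step 4: if stripped ends with a non-delimiter, also delete that word
--     if not is_delim(stripped[-1]):
--         j = len(stripped) - 1
--         while j > 0 and not is_delim(stripped[j - 1]):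
--             j -= 1
--         keep = stripped[:j]
--         return keep, keep + after
--
--     # Step 5: stripped ends with a different delimiter → stop here
--     return stripped, stripped + after
-- ===== SOURCE B (Python) =====
-- DELIMITERS = set(" /\"'`()[]{}-")
--
-- def delete_backward(before, after=""):
--     """Tokenize once into word / same-char-delimiter-run segments, then drop tail tokens."""
--     toks = []
--     i, n = 0, len(before)
--     while i < n:
--         c = before[i]
--         j = i + 1
--         if c in DELIMITERS:
--             while j < n and before[j] == c:
--                 j += 1
--         else:
--             while j < n and before[j] not in DELIMITERS:
--                 j += 1
--         toks.append(before[i:j])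
--         i = j
--     if not toks:
--         return "", after
--     last = toks.pop()
--     if last[0] in DELIMITERS:
--         c = last[0]
--         if toks and c != " " and toks[-1][0] not in DELIMITERS:
--             toks.pop()
--     keep = "".join(toks)
--     return keep, keep + after
-- ===== Notes on version B (the rewrite author's own statement) =====
-- stated objective: alternative
-- what changed: A deletes with up to three separate backward index scans from the end of the string with branch-specific stopping rules; B instead tokenizes the string in one forward pass into word / same-character-delimiter-run segments and then just drops one or two tail tokens and rejoins.
import Mathlib
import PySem

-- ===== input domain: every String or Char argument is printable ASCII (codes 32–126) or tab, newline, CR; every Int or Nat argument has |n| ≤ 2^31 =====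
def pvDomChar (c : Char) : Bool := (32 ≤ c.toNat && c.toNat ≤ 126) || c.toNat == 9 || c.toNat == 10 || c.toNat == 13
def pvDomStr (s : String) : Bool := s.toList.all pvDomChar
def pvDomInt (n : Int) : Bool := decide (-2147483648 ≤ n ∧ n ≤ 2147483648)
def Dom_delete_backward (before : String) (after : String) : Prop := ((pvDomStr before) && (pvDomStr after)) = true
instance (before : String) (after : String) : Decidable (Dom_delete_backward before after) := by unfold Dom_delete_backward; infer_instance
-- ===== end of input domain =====

-- B replaces A's chain of backward index scans by a single forward tokenization into
-- word / same-char-delimiter-run segments followed by dropping tail tokens (objective: alternative).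

def isDelim (c : Char) : Bool :=
  c == ' ' || c == '/' || c == '"' || c == '\'' || c == '`' || c == '(' || c == ')' ||
  c == '[' || c == ']' || c == '{' || c == '}' || c == '-'

-- ===== PORT A =====
-- the backward while-loops 'while i > 0 and p(before[i-1]): i -= 1' (index always in range)
def aScan (p : Char → Bool) (l : List Char) : Nat → Nat
  | 0 => 0
  | k + 1 => if p (l.getD k ' ') then aScan p l k else k + 1

def delete_backward (before : String) (after : String) : String × String :=
  let l := before.toList
  match l.getLast? with
  | none => ("", after)
  | some lastc =>
    if !isDelim lastc then
      let i := aScan (fun d => !isDelim d) l (l.length - 1)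
      let keep := l.take i
      (String.ofList keep, String.ofList (keep ++ after.toList))
    else
      let i := aScan (fun d => d == lastc) l (l.length - 1)
      let stripped := l.take i
      match stripped.getLast? with
      | none => ("", after)
      | some s =>
        if lastc == ' ' then (String.ofList stripped, String.ofList (stripped ++ after.toList))
        else if !isDelim s then
          let j := aScan (fun d => !isDelim d) stripped (stripped.length - 1)
          let keep := stripped.take j
          (String.ofList keep, String.ofList (keep ++ after.toList))
        else (String.ofList stripped, String.ofList (stripped ++ after.toList))

-- ===== PORT B =====
-- predicate for the run started by character c (word run / run of the same delimiter)
def runPred (c : Char) : Char → Bool :=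
  if isDelim c then (fun d => d == c) else (fun d => !isDelim d)

-- the forward token-building loop of Source B: each step consumes one maximal run
def tokenize : List Char → List (List Char)
  | [] => []
  | c :: rest => (c :: rest.takeWhile (runPred c)) :: tokenize (rest.dropWhile (runPred c))
  termination_by l => l.length
  decreasing_by
    have := List.length_dropWhile_le (runPred c) rest
    simp
    omega

def delete_backward_alt (before : String) (after : String) : String × String :=
  let toks := tokenize before.toList
  match toks.getLast? with
  | none => ("", after)
  | some last =>
    let toks1 := toks.dropLast
    let keepToks :=
      if isDelim (last.headD ' ') then
        match toks1.getLast? with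
        | some t =>
          if last.headD ' ' != ' ' && !isDelim (t.headD ' ') then toks1.dropLast else toks1
        | none => toks1
      else toks1
    let keep := keepToks.flatten
    (String.ofList keep, String.ofList (keep ++ after.toList))

-- ===== PRECONDITION & SPEC =====
def Spec_delete_backward (before : String) (after : String) (out : String × String) : Prop := out = delete_backward_alt before after
instance (before : String) (after : String) (out : String × String) : Decidable (Spec_delete_backward before after out) := by unfold Spec_delete_backward; infer_instance

-- ===== CLAIM (what is proved, stated in full; the proofs are below) =====
def Claim_equal_delete_backward : Prop := ∀ (before : String) (after : String), Dom_delete_backward before after → Spec_delete_backward before after (delete_backward before after)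

-- ===== LEMMAS AND PROOFS =====

theorem aScan_take (p : Char → Bool) (l : List Char) :
    ∀ i, i ≤ l.length → l.take (aScan p l i) = ((l.take i).reverse.dropWhile p).reverse := by
  intro i
  induction i with
  | zero => intro _; simp [aScan]
  | succ k ih =>
    intro hk
    have hklt : k < l.length := by omega
    have hstep : l.take (k+1) = l.take k ++ [l[k]] := List.take_succ_eq_append_getElem hklt
    have hget : l.getD k ' ' = l[k] := List.getD_eq_getElem l ' ' hklt
    rw [aScan, hget, hstep, List.reverse_append]
    simp only [List.reverse_cons, List.reverse_nil, List.nil_append, List.singleton_append,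
      List.dropWhile_cons]
    by_cases hp : p l[k] = true
    · rw [if_pos hp, if_pos hp]; exact ih (by omega)
    · rw [if_neg hp, if_neg hp, List.reverse_cons, List.reverse_reverse, ← hstep]

theorem aScan_spec (p : Char → Bool) (l : List Char) (h : l ≠ [])
    (hp : p (l.getLast h) = true) :
    l.take (aScan p l (l.length - 1)) = (l.reverse.dropWhile p).reverse := by
  have hrev : l.reverse = l.getLast h :: (l.take (l.length - 1)).reverse := by
    conv_lhs => rw [← List.dropLast_concat_getLast h]
    rw [List.reverse_append, List.dropLast_eq_take]
    simp
  rw [hrev, List.dropWhile_cons, hp]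
  simpa using aScan_take p l (l.length - 1) (by omega)

theorem tokenize_flatten (l : List Char) : (tokenize l).flatten = l := by
  induction l using tokenize.induct with
  | case1 => simp [tokenize]
  | case2 c rest ih => simp [tokenize, ih, List.takeWhile_append_dropWhile]

theorem runPred_self (c : Char) : runPred c c = true := by
  unfold runPred; by_cases hc : isDelim c <;> simp [hc]

theorem runPred_trans {c x : Char} (h : runPred c x = true) : runPred x = runPred c := by
  unfold runPred at h ⊢
  by_cases hc : isDelim c <;> simp [hc] at h
  · subst h; simp
  · simp [hc, h]

theorem noJoin {c a b : Char} (ha : runPred c a = false) (hb : runPred c b = true) :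
    runPred a b = false := by
  unfold runPred at ha hb ⊢
  by_cases hc : isDelim c
  · rw [if_pos hc] at ha hb
    have hbc : b = c := by simpa using hb
    subst hbc
    by_cases hda : isDelim a
    · rw [if_pos hda]
      simp only [beq_eq_false_iff_ne, ne_eq] at ha ⊢
      exact fun h => ha h.symm
    · rw [if_neg hda]
      simpa using hc
  · rw [if_neg hc] at ha hb
    have haD : isDelim a = true := by simpa using ha
    have hbD : isDelim b = false := by simpa using hb
    rw [if_pos haD]
    simp only [beq_eq_false_iff_ne, ne_eq]
    intro h
    rw [h, haD] at hbD
    cases hbD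

theorem tokenize_single (c : Char) (run : List Char)
    (hmem : ∀ x ∈ run, runPred c x = true) (hne : run ≠ []) : tokenize run = [run] := by
  cases run with
  | nil => exact absurd rfl hne
  | cons b rest =>
    have hb : runPred b = runPred c := runPred_trans (hmem b (List.mem_cons_self))
    have ht : rest.takeWhile (runPred b) = rest :=
      List.takeWhile_eq_self_iff.mpr fun x hx => by
        rw [hb]; exact hmem x (List.mem_cons_of_mem _ hx)
    have hd : rest.dropWhile (runPred b) = [] :=
      List.dropWhile_eq_nil_iff.mpr fun x hx => by
        rw [hb]; exact hmem x (List.mem_cons_of_mem _ hx)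
    simp [tokenize, ht, hd]

theorem tokenize_append (c : Char) (run : List Char) (hne : run ≠ [])
    (hmem : ∀ x ∈ run, runPred c x = true) :
    ∀ xs : List Char,
      (∀ a, xs.getLast? = some a → ∀ b, run.head? = some b → runPred a b = false) →
      tokenize (xs ++ run) = tokenize xs ++ [run] := by
  intro xs
  induction xs using tokenize.induct with
  | case1 =>
    intro _; simpa [tokenize] using tokenize_single c run hmem hne
  | case2 c0 xs' ih =>
    intro hbd
    by_cases hq : xs'.dropWhile (runPred c0) = []
    · -- every char of xs' continues c0's run; the run boundary is at the end of xs'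
      have hall : ∀ x ∈ xs', runPred c0 x = true := List.dropWhile_eq_nil_iff.mp hq
      have htw : xs'.takeWhile (runPred c0) = xs' := List.takeWhile_eq_self_iff.mpr hall
      -- the last char of c0 :: xs' has the same run predicate as c0
      have hlastpred : ∀ a, (c0 :: xs').getLast? = some a → runPred a = runPred c0 := by
        intro a ha
        cases hxs : xs' with
        | nil => simp [hxs] at ha; subst ha; rfl
        | cons y ys =>
          have hne' : xs' ≠ [] := by simp [hxs]
          rw [show (c0 :: xs') = [c0] ++ xs' from rfl,
            List.getLast?_append_of_ne_nil _ hne'] at ha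
          have hamem : a ∈ xs' := List.mem_of_getLast? ha
          exact runPred_trans (hall a hamem)
      obtain ⟨b, brest, hbrun⟩ : ∃ b brest, run = b :: brest := by
        cases run with
        | nil => exact absurd rfl hne
        | cons b brest => exact ⟨b, brest, rfl⟩
      obtain ⟨a, ha⟩ : ∃ a, (c0 :: xs').getLast? = some a := by
        cases h : (c0 :: xs').getLast? with
        | none => simp at h
        | some a => exact ⟨a, rfl⟩
      have hqb : runPred c0 b = false := by
        rw [← hlastpred a ha]
        exact hbd a ha b (by simp [hbrun])
      have h1 : (xs' ++ run).takeWhile (runPred c0) = xs' := by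
        rw [List.takeWhile_append, htw]
        simp [hbrun, hqb]
      have h2 : (xs' ++ run).dropWhile (runPred c0) = run := by
        rw [List.dropWhile_append, hq]
        simp [hbrun, hqb]
      show tokenize (c0 :: (xs' ++ run)) = tokenize (c0 :: xs') ++ [run]
      rw [tokenize, h1, h2, tokenize_single c run hmem hne, tokenize, htw, hq, tokenize]
      rfl
    · -- c0's run ends inside xs'; recurse on the remainder
      have hlen : (xs'.takeWhile (runPred c0)).length ≠ xs'.length := by
        have hsum := congrArg List.length (List.takeWhile_append_dropWhile (p := runPred c0) (l := xs'))
        rw [List.length_append] at hsum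
        have hpos : 0 < (xs'.dropWhile (runPred c0)).length := List.length_pos_of_ne_nil hq
        omega
      have h1 : (xs' ++ run).takeWhile (runPred c0) = xs'.takeWhile (runPred c0) := by
        rw [List.takeWhile_append]; simp [hlen]
      have h2 : (xs' ++ run).dropWhile (runPred c0) = xs'.dropWhile (runPred c0) ++ run := by
        rw [List.dropWhile_append]; simp [hq]
      have hxs'ne : xs' ≠ [] := by
        intro hcon; rw [hcon] at hq; exact hq rfl
      have hlast_eq : (xs'.dropWhile (runPred c0)).getLast? = (c0 :: xs').getLast? := by
        rw [show (c0 :: xs') = [c0] ++ xs' from rfl, List.getLast?_append_of_ne_nil _ hxs'ne]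
        conv_rhs => rw [← List.takeWhile_append_dropWhile (p := runPred c0) (l := xs')]
        rw [List.getLast?_append_of_ne_nil _ hq]
      have ih' := ih (by intro a ha b hb; exact hbd a (hlast_eq ▸ ha) b hb)
      show tokenize (c0 :: (xs' ++ run)) = tokenize (c0 :: xs') ++ [run]
      rw [tokenize, h1, h2, ih', tokenize]
      rfl

-- decomposition of the token list at the last (maximal trailing) run
theorem tok_decomp (l : List Char) (h : l ≠ []) (c : Char) (hc : l.getLast h = c) :
    tokenize l = tokenize (l.reverse.dropWhile (runPred c)).reverse ++
      [(l.reverse.takeWhile (runPred c)).reverse] := by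
  have hrev : l.reverse = c :: l.dropLast.reverse := by
    conv_lhs => rw [← List.dropLast_concat_getLast h, hc]
    simp
  have hrunne : (l.reverse.takeWhile (runPred c)).reverse ≠ [] := by
    rw [hrev, List.takeWhile_cons, runPred_self]; simp
  have hmem : ∀ x ∈ (l.reverse.takeWhile (runPred c)).reverse, runPred c x = true := by
    intro x hx
    exact List.mem_takeWhile_imp (List.mem_reverse.mp hx)
  have hl : l = (l.reverse.dropWhile (runPred c)).reverse ++
      (l.reverse.takeWhile (runPred c)).reverse := by
    rw [← List.reverse_append, List.takeWhile_append_dropWhile, List.reverse_reverse]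
  have hbd : ∀ a, ((l.reverse.dropWhile (runPred c)).reverse).getLast? = some a →
      ∀ b, ((l.reverse.takeWhile (runPred c)).reverse).head? = some b → runPred a b = false := by
    intro a ha b hb
    rw [List.getLast?_reverse] at ha
    have hane : l.reverse.dropWhile (runPred c) ≠ [] := by
      intro hcon; rw [hcon] at ha; simp at ha
    have hahead : (l.reverse.dropWhile (runPred c)).head hane = a := by
      rwa [List.head?_eq_some_head hane, Option.some_inj] at ha
    have hpa : runPred c a = false := by
      rw [← hahead]; exact List.head_dropWhile_not (runPred c) hane
    have hpb : runPred c b = true := by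
      have : b ∈ (l.reverse.takeWhile (runPred c)).reverse := by
        have hbne : (l.reverse.takeWhile (runPred c)).reverse ≠ [] := hrunne
        rw [List.head?_eq_some_head hbne, Option.some_inj] at hb
        rw [← hb]; exact List.head_mem hbne
      exact List.mem_takeWhile_imp (List.mem_reverse.mp this)
    exact noJoin hpa hpb
  conv_lhs => rw [hl]
  exact tokenize_append c _ hrunne hmem _ hbd

-- the head of a trailing run token: it is c itself for a delimiter run, a non-delimiter for a word run
theorem headD_mem {l : List Char} (h : l ≠ []) : l.headD ' ' ∈ l := by
  cases l with
  | nil => exact absurd rfl h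
  | cons x xs => simp

theorem run_headD_delim (r : List Char) (c : Char) (hc : isDelim c = true)
    (hne : (r.takeWhile (runPred c)).reverse ≠ []) :
    ((r.takeWhile (runPred c)).reverse).headD ' ' = c := by
  have hp : runPred c (((r.takeWhile (runPred c)).reverse).headD ' ') = true :=
    List.mem_takeWhile_imp (List.mem_reverse.mp (headD_mem hne))
  revert hp
  generalize ((r.takeWhile (runPred c)).reverse).headD ' ' = y
  intro hp
  rw [runPred, if_pos hc] at hp
  simpa using hp

theorem run_headD_word (r : List Char) (c : Char) (hc : isDelim c = false)
    (hne : (r.takeWhile (runPred c)).reverse ≠ []) :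
    isDelim (((r.takeWhile (runPred c)).reverse).headD ' ') = false := by
  have hp : runPred c (((r.takeWhile (runPred c)).reverse).headD ' ') = true :=
    List.mem_takeWhile_imp (List.mem_reverse.mp (headD_mem hne))
  revert hp
  generalize ((r.takeWhile (runPred c)).reverse).headD ' ' = y
  intro hp
  rw [runPred, if_neg (by simp [hc])] at hp
  simpa using hp

theorem run_reverse_ne (l : List Char) (h : l ≠ []) (c : Char) (hc : l.getLast h = c) :
    (l.reverse.takeWhile (runPred c)).reverse ≠ [] := by
  have hrev : l.reverse = c :: l.dropLast.reverse := by
    conv_lhs => rw [← List.dropLast_concat_getLast h, hc]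
    simp
  rw [hrev, List.takeWhile_cons, runPred_self]; simp

theorem main_eq (before after : String) :
    delete_backward before after = delete_backward_alt before after := by
  unfold delete_backward delete_backward_alt
  dsimp only
  cases hl : before.toList.getLast? with
  | none =>
    have hnil : before.toList = [] := by
      cases h : before.toList with
      | nil => rfl
      | cons x xs => rw [h] at hl; simp at hl
    simp [hnil, tokenize]
  | some lastc =>
    dsimp only
    have hne : before.toList ≠ [] := by
      intro hcon; rw [hcon] at hl; simp at hl
    have hlast : before.toList.getLast hne = lastc := by
      have h2 := List.getLast?_eq_some_getLast hne
      rw [hl] at h2; exact (Option.some_inj.mp h2).symm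
    by_cases hd : isDelim lastc
    · -- Phase B: trailing delimiter
      have hstripped : before.toList.take (aScan (fun d => d == lastc) before.toList (before.toList.length - 1)) =
          (before.toList.reverse.dropWhile (runPred lastc)).reverse := by
        rw [show runPred lastc = (fun d => d == lastc) by rw [runPred, if_pos hd]]
        exact aScan_spec _ _ hne (by rw [hlast]; simp)
      have hdecomp := tok_decomp before.toList hne lastc hlast
      set xs := (before.toList.reverse.dropWhile (runPred lastc)).reverse with hxs
      set run := (before.toList.reverse.takeWhile (runPred lastc)).reverse with hrun
      have hrunne : run ≠ [] := run_reverse_ne before.toList hne lastc hlast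
      have hrunhead : run.headD ' ' = lastc := run_headD_delim _ _ hd hrunne
      rw [hdecomp, hstripped]
      simp only [List.getLast?_concat, List.dropLast_concat, hrunhead, hd, Bool.not_true,
        Bool.false_eq_true, if_false, if_true]
      cases hxsnil : xs with
      | nil =>
        simp only [tokenize, List.getLast?_nil, List.flatten_nil]
        simp [String.ofList_toList]
      | cons z zs =>
        have hxsne : xs ≠ [] := by simp [hxsnil]
        rw [← hxsnil]
        have hsne : xs.getLast? = some (xs.getLast hxsne) := List.getLast?_eq_some_getLast hxsne
        rw [hsne]
        dsimp only
        by_cases hsp : lastc = ' '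
        · -- Step 3: space separator, stop after removing the run
          rw [if_pos (by simp [hsp])]
          have hcond : (lastc != ' ') = false := by simp [hsp]
          cases (tokenize xs).getLast? <;> simp [hcond, tokenize_flatten]
        · have hspb : (lastc == ' ') = false := by simp [hsp]
          rw [if_neg (by simp [hspb])]
          set s := xs.getLast hxsne with hs
          have hdecomp2 := tok_decomp xs hxsne s rfl
          set run2 := (xs.reverse.takeWhile (runPred s)).reverse with hrun2
          have hrun2ne : run2 ≠ [] := run_reverse_ne xs hxsne s rfl
          by_cases hds : isDelim s
          · -- Step 5: a different delimiter ends the remainder → stop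
            have hhead2 : run2.headD ' ' = s := run_headD_delim _ _ hds hrun2ne
            rw [hdecomp2]
            simp only [List.getLast?_concat, hhead2, hds, Bool.not_true, Bool.and_false,
              Bool.false_eq_true, if_false]
            rw [← hdecomp2, tokenize_flatten]
          · -- Step 4: remainder ends with a word → delete that word too
            have hds' : isDelim s = false := by simpa using hds
            have hhead2 : isDelim (run2.headD ' ') = false := run_headD_word _ _ hds' hrun2ne
            have hkeep : xs.take (aScan (fun d => !isDelim d) xs (xs.length - 1)) =
                (xs.reverse.dropWhile (runPred s)).reverse := by
              rw [show runPred s = (fun d => !isDelim d) by rw [runPred, if_neg (by simp [hds'])]]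
              exact aScan_spec _ _ hxsne (by simp [← hs, hds'])
            rw [if_pos (by simp [hds']), hkeep, hdecomp2]
            simp only [List.getLast?_concat, hhead2, hspb, List.dropLast_concat, Bool.not_false,
              Bool.and_true, bne, if_true]
            simp [tokenize_flatten]
    · -- Phase A: trailing word character
      have hd' : isDelim lastc = false := by simpa using hd
      have hkeep : before.toList.take (aScan (fun d => !isDelim d) before.toList (before.toList.length - 1)) =
          (before.toList.reverse.dropWhile (runPred lastc)).reverse := by
        rw [show runPred lastc = (fun d => !isDelim d) by rw [runPred, if_neg (by simp [hd'])]]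
        exact aScan_spec _ _ hne (by simp [hlast, hd'])
      have hdecomp := tok_decomp before.toList hne lastc hlast
      have hrunne := run_reverse_ne before.toList hne lastc hlast
      have hrunhead : isDelim (((before.toList.reverse.takeWhile (runPred lastc)).reverse).headD ' ') = false :=
        run_headD_word _ _ hd' hrunne
      rw [hdecomp, hkeep]
      simp only [List.getLast?_concat, List.dropLast_concat, hrunhead, hd', Bool.not_false,
        Bool.false_eq_true, if_false, if_true]
      simp [tokenize_flatten]

-- ===== VERDICT (by name: the statement is the Claim_ definition above) =====
theorem delete_backward_spec : Claim_equal_delete_backward := by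
  intro before after _
  unfold Spec_delete_backward
  exact main_eq before after
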